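-- pv_equiv track=rewrite | github.com/shawinsoranakom/CodeSnippets | CollectedSnippets/ComplexMethod/cm043372.py | _quick_depth
-- ===== SOURCE A (Python) =====
-- def _quick_depth(path: str) -> int:
--         """Ultra fast path depth calculation.
--
--         Examples:
--             - "http://example.com" -> 0  # No path segments
--             - "http://example.com/" -> 0  # Empty path
--             - "http://example.com/a" -> 1
--             - "http://example.com/a/b" -> 2
--         """
--         if not path or path == '/':
--             return 0
--
--         if '/' not in path:
--             return 0
--
--         depth = 0
--         last_was_slash = True
--
--         for c in path:
--             if c == '/':
--                 if not last_was_slash: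
--                     depth += 1
--                 last_was_slash = True
--             else:
--                 last_was_slash = False
--
--         if not last_was_slash:
--             depth += 1
--
--         return depth
-- ===== SOURCE B (Python) =====
-- def _quick_depth(path: str) -> int:
--     if '/' not in path:
--         return 0
--     return sum(1 for s in path.split('/') if s)
-- ===== Notes on version B (the rewrite author's own statement) =====
-- stated objective: simpler
-- what changed: Replaces the character-by-character scan with a last_was_slash state flag by splitting the string on '/' and counting the non-empty segments (keeping A's early return for slash-free strings).
import Mathlib
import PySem

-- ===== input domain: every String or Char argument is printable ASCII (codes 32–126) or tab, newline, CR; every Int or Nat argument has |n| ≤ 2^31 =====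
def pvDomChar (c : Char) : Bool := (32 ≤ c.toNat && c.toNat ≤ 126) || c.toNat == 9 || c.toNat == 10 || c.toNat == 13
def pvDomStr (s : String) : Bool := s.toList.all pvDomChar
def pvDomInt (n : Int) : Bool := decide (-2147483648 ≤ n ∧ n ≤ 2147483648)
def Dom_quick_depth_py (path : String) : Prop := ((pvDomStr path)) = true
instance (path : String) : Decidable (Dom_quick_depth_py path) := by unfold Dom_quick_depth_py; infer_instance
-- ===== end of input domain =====

-- B replaces A's character scan with a last_was_slash flag by splitting on '/' and counting non-empty segments (simpler).


-- ===== PORT A =====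
def quick_depth_py (path : String) : Int :=
  let cs := path.toList
  if cs = [] ∨ cs = ['/'] then 0
  else if PySem.Chars.isIn ['/'] cs = false then 0
  else
    let st := cs.foldl (fun (st : Int × Bool) c =>
      if c = '/' then (if st.2 = false then (st.1 + 1, true) else (st.1, true))
      else (st.1, false)) (0, true)
    if st.2 = false then st.1 + 1 else st.1

-- ===== PORT B =====
def quick_depth_py_alt (path : String) : Int :=
  if PySem.Chars.isIn ['/'] path.toList = false then 0
  else ((PySem.Chars.splitOn path.toList ['/']).countP (fun s => !s.isEmpty) : Int)

-- ===== PRECONDITION & SPEC =====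
def Spec_quick_depth_py (path : String) (out : Int) : Prop := out = quick_depth_py_alt path
instance (path : String) (out : Int) : Decidable (Spec_quick_depth_py path out) := by unfold Spec_quick_depth_py; infer_instance

-- ===== CLAIM (what is proved, stated in full; the proofs are below) =====
def Claim_equal_quick_depth_py : Prop := ∀ (path : String), Dom_quick_depth_py path → Spec_quick_depth_py path (quick_depth_py path)

-- ===== LEMMAS AND PROOFS =====

/-- Number of maximal non-'/' runs in `l`, given whether a run is already open. -/
def segCount : List Char → Bool → Nat
  | [], inSeg => if inSeg then 1 else 0
  | c :: rest, inSeg =>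
      if c = '/' then (if inSeg then 1 else 0) + segCount rest false
      else segCount rest true

lemma go_countP : ∀ (fuel : Nat) (l cur : List Char) (acc : List (List Char)),
    l.length < fuel →
    (PySem.Chars.splitOn.go ['/'] fuel l cur acc).countP (fun s => !s.isEmpty)
      = acc.countP (fun s => !s.isEmpty) + segCount l (!cur.isEmpty) := by
  intro fuel
  induction fuel with
  | zero => intro l cur acc h; omega
  | succ fuel ih =>
    intro l cur acc h
    cases l with
    | nil =>
      simp [PySem.Chars.splitOn.go, segCount, List.countP_cons]
    | cons c rest =>
      by_cases hc : c = '/'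
      · subst hc
        rw [show PySem.Chars.splitOn.go ['/'] (fuel+1) ('/'::rest) cur acc
            = PySem.Chars.splitOn.go ['/'] fuel rest [] (cur.reverse :: acc) by
          simp [PySem.Chars.splitOn.go, List.isPrefixOf]]
        rw [ih rest [] (cur.reverse :: acc) (by simpa using Nat.lt_of_succ_lt_succ h)]
        simp [segCount, List.countP_cons]
        cases cur <;> simp <;> omega
      · rw [show PySem.Chars.splitOn.go ['/'] (fuel+1) (c::rest) cur acc
            = PySem.Chars.splitOn.go ['/'] fuel rest (c :: cur) acc by
          simp only [PySem.Chars.splitOn.go, List.isPrefixOf, Bool.and_eq_true, beq_iff_eq]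
          rw [if_neg]; simp [eq_comm, hc]]
        rw [ih rest (c :: cur) acc (by simpa using Nat.lt_of_succ_lt_succ h)]
        simp [segCount, hc]

lemma splitOn_countP (cs : List Char) :
    (PySem.Chars.splitOn cs ['/']).countP (fun s => !s.isEmpty) = segCount cs false := by
  rw [PySem.Chars.splitOn, go_countP (cs.length + 1) cs [] [] (by omega)]
  simp

lemma foldA (cs : List Char) : ∀ (d : Int) (last : Bool),
    (let st := cs.foldl (fun (st : Int × Bool) c =>
        if c = '/' then (if st.2 = false then (st.1 + 1, true) else (st.1, true))
        else (st.1, false)) (d, last);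
      if st.2 = false then st.1 + 1 else st.1) = d + (segCount cs (!last) : Int) := by
  induction cs with
  | nil => intro d last; cases last <;> simp [segCount]
  | cons c rest ih =>
    intro d last
    by_cases hc : c = '/'
    · subst hc
      cases last <;> simp [List.foldl_cons, segCount, ih] <;> push_cast <;> ring
    · simp [List.foldl_cons, hc, segCount, ih]

lemma mem_iff_isIn (cs : List Char) : PySem.Chars.isIn ['/'] cs = true ↔ '/' ∈ cs := by
  rw [PySem.Chars.isIn_iff_infix]
  constructor
  · intro h; exact h.mem (by simp)
  · intro h
    obtain ⟨a, b, rfl⟩ := List.mem_iff_append.mp h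
    exact ⟨a, b, by simp⟩

-- ===== VERDICT (by name: the statement is the Claim_ definition above) =====
theorem quick_depth_py_spec : Claim_equal_quick_depth_py := by
  intro path _
  unfold Spec_quick_depth_py quick_depth_py quick_depth_py_alt
  cases h : PySem.Chars.isIn ['/'] path.toList with
  | false =>
    rcases hg : path.toList with _ | ⟨c, rest⟩
    · simp
    · by_cases he : c :: rest = ['/']
      · simp [he]
      · rw [hg] at h; simp [he, h]
  | true =>
    simp only [h, Bool.true_eq_false, if_false]
    rw [splitOn_countP]
    rcases hg : path.toList with _ | ⟨c, rest⟩
    · exact absurd ((mem_iff_isIn _).mp (hg ▸ h)) (by simp)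
    · rw [hg] at h
      by_cases he : c :: rest = ['/']
      · rw [if_pos (Or.inr he), he]; simp [segCount]
      · rw [if_neg (by simp [he])]
        have := foldA (c :: rest) 0 true
        simp only [Bool.not_true] at this
        exact this.trans (by simp)
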